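-- pv_equiv track=rewrite | github.com/pypi-data/pypi-mirror-189 | packages/mymatchstick2023/mymatchstick2023-1.0.0.tar.gz/mymatchstick2023-1.0.0/mymatchstick2023.py | match_num
-- ===== SOURCE A (Python) =====
-- def match_num(num):
--     f=[6,2,5,5,4,5,6,3,7,6]    #数字0~9各需要的火柴棒数
--     total=0
--     if num==0:
--         total=f[0]
--     else:
--         while (num>0):
--             x=num%10           #取num除以10的余数，即num的个位数
--             total=total+f[x]   #所需火柴棒相加
--             num=num//10        #num整除10，去掉num的个位数，得到剩余数位上的数字
--     return total               #返回需要多少根火柴棒数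
-- ===== SOURCE B (Python) =====
-- def match_num(num):
--     f = [6, 2, 5, 5, 4, 5, 6, 3, 7, 6]
--     if num == 0:
--         return 6
--     if num < 0:
--         return 0
--     return f[num % 10] + (match_num(num // 10) if num >= 10 else 0)
-- ===== Notes on version B (the rewrite author's own statement) =====
-- stated objective: alternative
-- what changed: Replaced the accumulator while-loop over the digits by direct recursion on the number with its last digit removed, with base cases for zero and negative input.
import Mathlib
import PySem

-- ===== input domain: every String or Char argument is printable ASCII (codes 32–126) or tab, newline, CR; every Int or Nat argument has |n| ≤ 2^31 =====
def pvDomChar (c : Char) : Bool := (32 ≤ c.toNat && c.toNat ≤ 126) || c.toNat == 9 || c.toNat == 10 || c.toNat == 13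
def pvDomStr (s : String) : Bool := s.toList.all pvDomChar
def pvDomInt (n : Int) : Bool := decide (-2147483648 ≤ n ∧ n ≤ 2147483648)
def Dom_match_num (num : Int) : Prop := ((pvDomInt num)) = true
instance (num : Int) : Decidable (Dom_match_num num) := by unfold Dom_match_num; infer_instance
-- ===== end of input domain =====

-- B rewrites A's accumulator while-loop over the digits as direct recursion on num // 10 (alternative decomposition, same cost).

-- ===== PORT A =====
-- the matchstick table f = [6,2,5,5,4,5,6,3,7,6]
def pvF : List Int := [6, 2, 5, 5, 4, 5, 6, 3, 7, 6]

-- the while-loop of A, with its accumulator `total`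
def pvLoopA (num total : Int) : Int :=
  if num > 0 then
    pvLoopA (PySem.Int.floordiv num 10)
      (total + (PySem.List.pyGet? pvF (PySem.Int.mod num 10)).getD 0)
  else total
termination_by num.toNat
decreasing_by
  rename_i h
  rw [PySem.Int.floordiv_eq_ediv_of_pos (by norm_num : (0:Int) < 10)]
  omega

def match_num (num : Int) : Int :=
  if num == 0 then (PySem.List.pyGet? pvF 0).getD 0
  else pvLoopA num 0

-- ===== PORT B =====
def match_num_alt (num : Int) : Int :=
  if num == 0 then 6
  else if num < 0 then 0
  else (PySem.List.pyGet? pvF (PySem.Int.mod num 10)).getD 0 +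
    (if num ≥ 10 then match_num_alt (PySem.Int.floordiv num 10) else 0)
termination_by num.toNat
decreasing_by
  rw [PySem.Int.floordiv_eq_ediv_of_pos (by norm_num : (0:Int) < 10)]
  omega

-- ===== PRECONDITION & SPEC =====
def Spec_match_num (num : Int) (out : Int) : Prop := out = match_num_alt num
instance (num : Int) (out : Int) : Decidable (Spec_match_num num out) := by unfold Spec_match_num; infer_instance

-- ===== CLAIM (what is proved, stated in full; the proofs are below) =====
def Claim_equal_match_num : Prop := ∀ (num : Int), Dom_match_num num → Spec_match_num num (match_num num)

-- ===== LEMMAS AND PROOFS =====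

-- accumulator lemma for A's loop
theorem pvLoopA_acc (n : Nat) : ∀ (num total : Int), num.toNat = n →
    pvLoopA num total = total + pvLoopA num 0 := by
  induction n using Nat.strong_induction_on with
  | _ n ih =>
    intro num total hn
    rw [pvLoopA]
    conv_rhs => rw [pvLoopA]
    by_cases h : num > 0
    · have hd : PySem.Int.floordiv num 10 = num / 10 :=
        PySem.Int.floordiv_eq_ediv_of_pos (by norm_num)
      have hlt : (PySem.Int.floordiv num 10).toNat < n := by rw [hd]; omega
      rw [if_pos h, if_pos h, ih _ hlt _ _ rfl]
      conv_rhs => rw [ih _ hlt _ _ rfl]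
      ring
    · simp [h]

theorem pvLoopA_eq_alt (n : Nat) : ∀ (num : Int), num.toNat = n → 0 < num →
    pvLoopA num 0 = match_num_alt num := by
  induction n using Nat.strong_induction_on with
  | _ n ih =>
    intro num hn hpos
    have hd : PySem.Int.floordiv num 10 = num / 10 :=
      PySem.Int.floordiv_eq_ediv_of_pos (by norm_num)
    rw [pvLoopA]
    rw [if_pos hpos]
    rw [pvLoopA_acc (PySem.Int.floordiv num 10).toNat _ _ rfl]
    rw [match_num_alt]
    have h0 : (num == 0) = false := by simp; omega
    rw [h0, if_neg (by simp), if_neg (by omega : ¬ num < 0)]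
    by_cases h10 : num ≥ 10
    · have hlt : (PySem.Int.floordiv num 10).toNat < n := by rw [hd]; omega
      rw [if_pos h10, ih _ hlt _ rfl (by rw [hd]; omega)]
      ring
    · have hq : PySem.Int.floordiv num 10 = 0 := by rw [hd]; omega
      rw [if_neg h10, hq, pvLoopA]
      norm_num

-- ===== VERDICT (by name: the statement is the Claim_ definition above) =====
theorem match_num_spec : Claim_equal_match_num := by
  intro num _
  unfold Spec_match_num
  by_cases h : num = 0
  · subst h
    rw [match_num, match_num_alt]
    norm_num
    decide
  · by_cases hpos : 0 < num
    · rw [match_num]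
      rw [if_neg (by simp [h])]
      exact pvLoopA_eq_alt num.toNat num rfl hpos
    · rw [match_num, if_neg (by simp [h]), pvLoopA, if_neg hpos, match_num_alt,
        if_neg (by simp [h]), if_pos (by omega : num < 0)]
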